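-- pv_equiv track=rewrite | github.com/Generative-Logic/GL | create_expressions.py | mapping_good
-- ===== SOURCE A (Python) =====
-- def mapping_good(mapping: dict):
--     result = 1
--
--     reversed_mapping = {}
--     for key in mapping:
--         value = mapping[key]
--         if value in reversed_mapping:
--             reversed_mapping[value] = min(reversed_mapping[value], key)
--         else:
--             reversed_mapping[value] = key
--
--     for value in reversed_mapping:
--         if reversed_mapping[value] != value:
--             result = 0
--
--     return result
-- ===== SOURCE B (Python) =====
-- def mapping_good(mapping: dict):
--     ok = all(mapping.get(v) == v and v <= k for k, v in mapping.items())
--     return 1 if ok else 0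
-- ===== Notes on version B (the rewrite author's own statement) =====
-- stated objective: simpler
-- what changed: A builds a reverse index value->min key in a dict pass and then scans it; B drops the reverse index entirely and checks the pointwise fixpoint condition mapping.get(v) == v and v <= k for every pair (k, v) in a single all(...) pass.
import Mathlib
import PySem

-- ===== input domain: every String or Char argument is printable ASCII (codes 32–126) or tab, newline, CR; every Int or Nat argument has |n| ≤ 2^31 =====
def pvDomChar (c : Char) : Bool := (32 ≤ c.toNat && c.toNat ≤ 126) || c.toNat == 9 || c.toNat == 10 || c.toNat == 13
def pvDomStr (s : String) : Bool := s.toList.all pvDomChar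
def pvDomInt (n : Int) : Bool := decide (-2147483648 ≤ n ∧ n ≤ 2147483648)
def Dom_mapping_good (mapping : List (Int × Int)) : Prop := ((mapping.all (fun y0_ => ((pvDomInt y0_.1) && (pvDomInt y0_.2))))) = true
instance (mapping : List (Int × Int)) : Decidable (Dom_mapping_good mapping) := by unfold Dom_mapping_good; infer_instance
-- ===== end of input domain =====

-- B replaces A's reverse-index (value -> min key) construction and scan by a single pointwise
-- fixpoint check: every pair (k, v) must satisfy mapping.get(v) == v and v <= k. Objective: simpler.

-- ===== PORT A =====
def mapping_good (mapping : List (Int × Int)) : Int :=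
  let m := PySem.Dict.ofList mapping
  let result : Int := 1
  let reversed := m.keys.foldl (fun (rev : PySem.Dict Int Int) key =>
    let value := m.getD key 0
    if rev.contains value then
      rev.insert value (min (rev.getD value 0) key)
    else
      rev.insert value key) PySem.Dict.empty
  reversed.keys.foldl (fun r value => if reversed.getD value 0 ≠ value then 0 else r) result

-- ===== PORT B =====
def mapping_good_alt (mapping : List (Int × Int)) : Int :=
  let m := PySem.Dict.ofList mapping
  let ok := m.items.all (fun p => (m.get? p.2 == some p.2) && decide (p.2 ≤ p.1))
  if ok then 1 else 0

-- ===== PRECONDITION & SPEC =====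
def Spec_mapping_good (mapping : List (Int × Int)) (out : Int) : Prop := out = mapping_good_alt mapping
instance (mapping : List (Int × Int)) (out : Int) : Decidable (Spec_mapping_good mapping out) := by unfold Spec_mapping_good; infer_instance

-- ===== CLAIM (what is proved, stated in full; the proofs are below) =====
def Claim_equal_mapping_good : Prop := ∀ (mapping : List (Int × Int)), Dom_mapping_good mapping → Spec_mapping_good mapping (mapping_good mapping)

-- ===== LEMMAS AND PROOFS =====

-- A's loop body, as a function of the (key, value) pair
def stepA (rev : PySem.Dict Int Int) (p : Int × Int) : PySem.Dict Int Int :=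
  if rev.contains p.2 then rev.insert p.2 (min (rev.getD p.2 0) p.1) else rev.insert p.2 p.1

-- running minimum as an Option accumulator
def minAcc (o : Option Int) (k : Int) : Option Int :=
  some (match o with | some m => min m k | none => k)

theorem stepA_eq_insert (rev : PySem.Dict Int Int) (p : Int × Int) :
    stepA rev p = rev.insert p.2 (if rev.contains p.2 then min (rev.getD p.2 0) p.1 else p.1) := by
  unfold stepA; split <;> rfl

-- the reverse-index fold, looked up at v, is the running minimum of the keys carrying value v
theorem get?_foldl_stepA (L : List (Int × Int)) (d0 : PySem.Dict Int Int) (v : Int) :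
    (L.foldl stepA d0).get? v
      = ((L.filter (fun p => p.2 == v)).map (·.1)).foldl minAcc (d0.get? v) := by
  induction L generalizing d0 with
  | nil => rfl
  | cons p L ih =>
    simp only [List.foldl_cons, ih, List.filter_cons]
    by_cases hv : p.2 = v
    · have h1 : (stepA d0 p).get? v = minAcc (d0.get? v) p.1 := by
        rw [stepA_eq_insert, hv, PySem.Dict.get?_insert_self]
        rcases h : d0.get? v with _ | m
        · have hc : d0.contains v = false := by
            rw [PySem.Dict.contains_eq_isSome_get?, h]; rfl
          simp [minAcc, hc]
        · have hc : d0.contains v = true := by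
            rw [PySem.Dict.contains_eq_isSome_get?, h]; rfl
          have hg : d0.getD v 0 = m := PySem.Dict.getD_of_get?_eq_some d0 0 h
          simp [minAcc, hc, hg]
      simp [hv, h1]
    · have h1 : (stepA d0 p).get? v = d0.get? v := by
        rw [stepA_eq_insert]
        exact PySem.Dict.get?_insert_of_ne d0 _ (fun h => hv h.symm)
      simp [hv, h1]

theorem foldl_minAcc_some (ks : List Int) (a : Int) :
    ks.foldl minAcc (some a) = some (ks.foldl min a) := by
  induction ks generalizing a with
  | nil => rfl
  | cons x ks ih => simp [minAcc, ih]

theorem foldl_minAcc_none (ks : List Int) : ks.foldl minAcc none = ks.min? := by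
  cases ks with
  | nil => rfl
  | cons x ks =>
    simp only [List.foldl_cons]
    rw [show minAcc none x = some x from rfl, foldl_minAcc_some]
    rfl

-- A's second loop: result goes (and stays) 0 iff some element violates the check
theorem foldl_result_zero (p : Int → Prop) [DecidablePred p] (l : List Int) (r : Int) :
    l.foldl (fun r v => if p v then 0 else r) r = if ∀ v ∈ l, ¬ p v then r else 0 := by
  induction l generalizing r with
  | nil => simp
  | cons x l ih =>
    simp only [List.foldl_cons, ih]
    by_cases hx : p x <;> simp [hx]

-- ===== VERDICT (by name: the statement is the Claim_ definition above) =====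
theorem mapping_good_spec : Claim_equal_mapping_good := by
  intro mapping _
  unfold Spec_mapping_good mapping_good mapping_good_alt
  set m := PySem.Dict.ofList mapping with hm
  have hnd : m.keys.Nodup := PySem.Dict.nodup_keys_ofList mapping
  -- A's fold over keys is the fold of stepA over items
  have hfold : m.keys.foldl (fun (rev : PySem.Dict Int Int) key =>
      let value := m.getD key 0
      if rev.contains value then
        rev.insert value (min (rev.getD value 0) key)
      else
        rev.insert value key) PySem.Dict.empty
      = m.items.foldl stepA PySem.Dict.empty := by
    rw [PySem.Dict.items_eq_map_keys m hnd 0, List.foldl_map]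
    rfl
  simp only [hfold]
  set rev := m.items.foldl stepA PySem.Dict.empty with hrev
  -- keys of the reverse index = the distinct values of m
  have hkeys : rev.keys = PySem.Set.update (PySem.Dict.empty : PySem.Dict Int Int).keys (m.items.map (·.2)) := by
    rw [hrev]
    have : stepA = fun (d : PySem.Dict Int Int) (p : Int × Int) =>
        d.insert p.2 ((fun (d : PySem.Dict Int Int) (p : Int × Int) =>
          if d.contains p.2 then min (d.getD p.2 0) p.1 else p.1) d p) := by
      funext d p; exact stepA_eq_insert d p
    rw [this]
    exact PySem.Dict.keys_foldl_insert_key m.items (·.2) _ PySem.Dict.empty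
  have hkeys' : ∀ v, v ∈ rev.keys ↔ v ∈ m.items.map (·.2) := by
    intro v
    rw [hkeys, PySem.Dict.keys_empty, PySem.Set.update_nil_left, PySem.Set.mem_ofList]
  -- lookup in the reverse index = min? of the keys carrying that value
  have hget : ∀ v, rev.get? v = ((m.items.filter (fun p => p.2 == v)).map (·.1)).min? := by
    intro v
    rw [hrev, get?_foldl_stepA, PySem.Dict.get?_empty, foldl_minAcc_none]
  rw [foldl_result_zero (fun v => rev.getD v 0 ≠ v)]
  -- both sides are 1/0 on logically equivalent conditions
  have hiff : (∀ v ∈ rev.keys, ¬ rev.getD v 0 ≠ v)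
      ↔ (m.items.all (fun p => (m.get? p.2 == some p.2) && decide (p.2 ≤ p.1)) = true) := by
    simp only [not_not, List.all_eq_true, Bool.and_eq_true, beq_iff_eq, decide_eq_true_eq]
    constructor
    · intro H p hp
      have hvmem : p.2 ∈ rev.keys := (hkeys' p.2).2 (List.mem_map_of_mem hp)
      have := H p.2 hvmem
      rw [PySem.Dict.getD_eq_get?_getD, hget] at this
      rcases hmin : ((m.items.filter (fun q => q.2 == p.2)).map (·.1)).min? with _ | a
      · exfalso
        have hmem : p.1 ∈ (m.items.filter (fun q => q.2 == p.2)).map (·.1) :=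
          List.mem_map_of_mem (List.mem_filter.2 ⟨hp, by simp⟩)
        have := List.isSome_min?_of_mem hmem
        rw [hmin] at this; exact Bool.noConfusion this
      · rw [hmin] at this
        simp only [Option.getD_some] at this
        obtain ⟨hamem, hale⟩ := List.min?_eq_some_iff.1 hmin
        rcases List.mem_map.1 hamem with ⟨q, hq, hq1⟩
        have hq2 : q.2 = p.2 := by simpa using (List.mem_filter.1 hq).2
        have hqm : q ∈ m.items := (List.mem_filter.1 hq).1
        constructor
        · have hqa : q = (p.2, p.2) := Prod.ext (by rw [hq1, this]) hq2
          rw [hqa] at hqm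
          exact ((PySem.Dict.get?_eq_some_iff_mem_items m p.2 p.2 hnd).2 hqm)
        · have := hale p.1 (List.mem_map_of_mem (List.mem_filter.2 ⟨hp, by simp⟩))
          omega
    · intro H v hv
      rcases List.mem_map.1 ((hkeys' v).1 hv) with ⟨p, hp, hpv⟩
      obtain ⟨hself, _⟩ := H p hp
      rw [hpv] at hself
      have hvv : (v, v) ∈ m.items := PySem.Dict.mem_items_of_get?_eq_some m hself
      have hvmem : v ∈ (m.items.filter (fun q => q.2 == v)).map (·.1) :=
        List.mem_map_of_mem (f := (·.1)) (List.mem_filter.2 ⟨hvv, by simp⟩)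
      obtain ⟨a, hmin⟩ := Option.isSome_iff_exists.1 (List.isSome_min?_of_mem hvmem)
      obtain ⟨hamem, hale⟩ := List.min?_eq_some_iff.1 hmin
      have hav : a = v := by
        rcases List.mem_map.1 hamem with ⟨q, hq, hq1⟩
        have hq2 : q.2 = v := by simpa using (List.mem_filter.1 hq).2
        have hqm : q ∈ m.items := (List.mem_filter.1 hq).1
        obtain ⟨_, hle⟩ := H q hqm
        have h1 : v ≤ a := by rw [← hq1, ← hq2]; exact hle
        exact le_antisymm (hale v hvmem) h1
      rw [PySem.Dict.getD_eq_get?_getD, hget, hmin, hav]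
      rfl
  by_cases hc : ∀ v ∈ rev.keys, ¬ rev.getD v 0 ≠ v
  · rw [if_pos hc, if_pos (hiff.1 hc)]
  · rw [if_neg hc, if_neg (fun h => hc (hiff.2 h))]
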